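-- pv_equiv track=rewrite | github.com/srimon12/vllm-factory | plugins/deberta_gliner/benchmark.py | _generate_texts
-- ===== SOURCE A (Python) =====
-- _BASE_WORDS = (
--     "John Smith john.smith@example.com works at NVIDIA Corporation in Santa Clara "
--     "California since 2015 his phone number is 555-0123 and his home address is "
--     "742 Evergreen Terrace Springfield Illinois 62704 United States of America "
--     "contact his assistant Jane Doe at jane.doe@nvidia.com for scheduling"
-- ).split()
--
-- def _generate_texts(target_tokens: int, n: int = 100) -> list:
--     target_words = max(8, int(target_tokens * 0.75))
--     texts = []
--     for i in range(n):
--         words = []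
--         while len(words) < target_words:
--             words.extend(_BASE_WORDS)
--         words = words[:target_words]
--         words[0] = f"Sample{i}"
--         texts.append(" ".join(words))
--     return texts
-- ===== SOURCE B (Python) =====
-- _BASE_WORDS = (
--     "John Smith john.smith@example.com works at NVIDIA Corporation in Santa Clara "
--     "California since 2015 his phone number is 555-0123 and his home address is "
--     "742 Evergreen Terrace Springfield Illinois 62704 United States of America "
--     "contact his assistant Jane Doe at jane.doe@nvidia.com for scheduling"
-- ).split()
--
-- def _generate_texts(target_tokens: int, n: int = 100) -> list:
--     # Each text is "Sample{i}" followed by words 1..target_words-1 of an infinite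
--     # cyclic repetition of _BASE_WORDS.  Instead of materialising and truncating a
--     # repeated list per text, select each word directly by its cyclic index j % m
--     # and join the invariant suffix once.
--     if n <= 0:
--         return []
--     target_words = max(8, int(target_tokens * 0.75))
--     m = len(_BASE_WORDS)
--     suffix = " ".join(_BASE_WORDS[j % m] for j in range(1, target_words))
--     return ["Sample%d %s" % (i, suffix) for i in range(n)]
-- ===== Notes on version B (the rewrite author's own statement) =====
-- stated objective: alternative
-- what changed: Instead of repeatedly extending a list with whole copies of _BASE_WORDS and truncating it for every text, B selects each suffix word directly by its cyclic index j % len(_BASE_WORDS), joins the invariant suffix once, and formats each text with a single %-interpolation.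
import Mathlib
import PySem

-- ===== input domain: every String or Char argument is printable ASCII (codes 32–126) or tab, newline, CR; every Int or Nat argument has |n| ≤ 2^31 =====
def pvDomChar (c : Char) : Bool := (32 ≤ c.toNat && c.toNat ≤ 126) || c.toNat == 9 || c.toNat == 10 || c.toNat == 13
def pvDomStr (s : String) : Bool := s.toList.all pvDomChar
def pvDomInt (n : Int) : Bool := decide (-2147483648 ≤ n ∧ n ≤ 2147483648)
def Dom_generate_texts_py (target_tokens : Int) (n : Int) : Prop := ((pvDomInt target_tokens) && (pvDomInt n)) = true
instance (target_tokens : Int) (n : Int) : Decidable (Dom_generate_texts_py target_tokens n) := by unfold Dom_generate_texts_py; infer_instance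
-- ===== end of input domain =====

-- B selects each suffix word directly by its cyclic index j % len(_BASE_WORDS) and joins the
-- invariant suffix once, replacing A's per-text repeat-extend-truncate list construction
-- (objective: alternative decomposition).

-- module constant `_BASE_WORDS` (42 words), shared context of both implementations
def pvBaseWords : List String :=
  ["John", "Smith", "john.smith@example.com", "works", "at", "NVIDIA", "Corporation", "in",
   "Santa", "Clara", "California", "since", "2015", "his", "phone", "number", "is", "555-0123",
   "and", "his", "home", "address", "is", "742", "Evergreen", "Terrace", "Springfield",
   "Illinois", "62704", "United", "States", "of", "America", "contact", "his", "assistant",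
   "Jane", "Doe", "at", "jane.doe@nvidia.com", "for", "scheduling"]

-- `max(8, int(target_tokens * 0.75))`, appearing verbatim in both A and B. Ported by hand:
-- on |t| ≤ 2^31 the float product t*0.75 = 3t/4 is exact (3|t| < 2^53) and int() truncates toward 0,
-- so it equals truncating integer division of 3t by 4 — exact on the stated domain.
def pvTargetWords (t : Int) : Int :=
  max 8 (if 0 ≤ t then PySem.Int.floordiv (3 * t) 4 else -(PySem.Int.floordiv (3 * (-t)) 4))

-- ===== PORT A =====
-- A's inner `while len(words) < target_words: words.extend(_BASE_WORDS)`
def pvFillA (tw : Int) (words : List String) : List String :=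
  if ((words.length : Int) < tw) then pvFillA tw (words ++ pvBaseWords) else words
termination_by (tw - words.length).toNat
decreasing_by simp [pvBaseWords]; omega

def generate_texts_py (target_tokens : Int) (n : Int) : List String :=
  let target_words := pvTargetWords target_tokens
  (PySem.List.pyRange 0 n 1).map (fun i =>
    -- words[:target_words]
    let words := PySem.List.slice (pvFillA target_words []) none (some target_words)
    -- words[0] = f"Sample{i}"  (words is nonempty: its length is target_words ≥ 8)
    let words := ("Sample" ++ PySem.Int.toStr i) :: words.tail
    PySem.Str.join " " words)

-- ===== PORT B =====
def generate_texts_py_alt (target_tokens : Int) (n : Int) : List String :=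
  -- early return: no texts requested, nothing to build
  if n ≤ 0 then []
  else
  let target_words := pvTargetWords target_tokens
  let m := PySem.List.len pvBaseWords
  -- suffix = " ".join(_BASE_WORDS[j % m] for j in range(1, target_words))
  -- (j % m is always in range, so the total pyGetD is exact here)
  let suffix := PySem.Str.join " "
    ((PySem.List.pyRange 1 target_words 1).map
      (fun j => PySem.List.pyGetD pvBaseWords (PySem.Int.mod j m) ""))
  -- ["Sample%d %s" % (i, suffix) for i in range(n)]
  (PySem.List.pyRange 0 n 1).map (fun i => "Sample" ++ PySem.Int.toStr i ++ " " ++ suffix)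

-- ===== PRECONDITION & SPEC =====
def Spec_generate_texts_py (target_tokens : Int) (n : Int) (out : List String) : Prop := out = generate_texts_py_alt target_tokens n
instance (target_tokens : Int) (n : Int) (out : List String) : Decidable (Spec_generate_texts_py target_tokens n out) := by unfold Spec_generate_texts_py; infer_instance

-- ===== CLAIM (what is proved, stated in full; the proofs are below) =====
def Claim_equal_generate_texts_py : Prop := ∀ (target_tokens : Int) (n : Int), Dom_generate_texts_py target_tokens n → Spec_generate_texts_py target_tokens n (generate_texts_py target_tokens n)

-- ===== LEMMAS AND PROOFS =====

theorem pvTargetWords_ge_8 (t : Int) : 8 ≤ pvTargetWords t := le_max_left _ _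

-- A's while loop appends whole copies of _BASE_WORDS until long enough
theorem pvFillA_spec (tw : Int) (ws : List String) :
    ∃ k : Nat, pvFillA tw ws = ws ++ (List.replicate k pvBaseWords).flatten ∧
      tw ≤ (ws.length : Int) + 42 * k := by
  fun_induction pvFillA tw ws with
  | case1 ws h ih =>
      obtain ⟨k, hk, hb⟩ := ih
      refine ⟨k + 1, ?_, ?_⟩
      · rw [hk, List.replicate_succ, List.flatten_cons, List.append_assoc]
      · simp only [List.length_append] at hb
        have h42 : pvBaseWords.length = 42 := by decide
        rw [h42] at hb; push_cast at hb ⊢; omega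
  | case2 ws h => exact ⟨0, by simp, by omega⟩

theorem length_flatten_rep (k : Nat) : ((List.replicate k pvBaseWords).flatten).length = 42 * k := by
  induction k with
  | zero => simp
  | succ k ih =>
      rw [List.replicate_succ, List.flatten_cons, List.length_append, ih]
      have h42 : pvBaseWords.length = 42 := by decide
      rw [h42]; ring

-- element j of the k-fold repetition is the base word at the cyclic index j % 42
theorem getElem?_flatten_rep (k j : Nat) (hj : j < 42 * k) :
    ((List.replicate k pvBaseWords).flatten)[j]? = pvBaseWords[j % 42]? := by
  induction k generalizing j with
  | zero => omega
  | succ k ih =>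
      rw [List.replicate_succ, List.flatten_cons]
      have h42 : pvBaseWords.length = 42 := by decide
      by_cases h : j < 42
      · rw [List.getElem?_append_left (by omega), Nat.mod_eq_of_lt h]
      · rw [List.getElem?_append_right (by omega), h42]
        have := ih (j - 42) (by omega)
        rw [this]
        congr 1
        omega

-- joining with the head replaced = head ++ " " ++ join of the tail  (tail nonempty)
theorem join_cons_eq (s b1 : String) (rest : List String) :
    PySem.Str.join " " (s :: b1 :: rest) = s ++ " " ++ PySem.Str.join " " (b1 :: rest) := by
  have h : (PySem.Str.join " " (s :: b1 :: rest)).toList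
      = (s ++ " " ++ PySem.Str.join " " (b1 :: rest)).toList := by
    simp [PySem.Str.toList_join, PySem.Chars.join_cons_cons]
  exact String.toList_injective h

theorem generate_texts_py_spec : Claim_equal_generate_texts_py := by
  unfold Claim_equal_generate_texts_py
  intro t n _
  unfold Spec_generate_texts_py generate_texts_py generate_texts_py_alt
  by_cases hn : n ≤ 0
  · have hr : PySem.List.pyRange 0 n 1 = [] := by simp [PySem.List.pyRange]; omega
    simp [hr, hn]
  · rw [if_neg hn]
    dsimp only
    set tw := pvTargetWords t with htw
    have h8 : 8 ≤ tw := pvTargetWords_ge_8 t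
    -- A's filled list
    obtain ⟨k, hk, hkb⟩ := pvFillA_spec tw []
    simp only [List.nil_append, List.length_nil, Int.natCast_zero, zero_add] at hk hkb
    -- A's truncated word list
    have hsl : PySem.List.slice (pvFillA tw []) none (some tw)
        = ((List.replicate k pvBaseWords).flatten).take tw.toNat := by
      rw [hk, PySem.List.slice_to _ (by omega : (0:Int) ≤ tw)]
    rw [hsl]
    -- the tail of A's truncation equals B's modular-index suffix list
    have hm : PySem.List.len pvBaseWords = 42 := by decide
    have htail : (((List.replicate k pvBaseWords).flatten).take tw.toNat).tail
        = (PySem.List.pyRange 1 tw 1).map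
            (fun j => PySem.List.pyGetD pvBaseWords (PySem.Int.mod j (PySem.List.len pvBaseWords)) "") := by
      apply List.ext_getElem?
      intro idx
      have hlenf : ((List.replicate k pvBaseWords).flatten).length = 42 * k := length_flatten_rep k
      have hlt : tw.toNat ≤ 42 * k := by omega
      have hlenA : (((List.replicate k pvBaseWords).flatten).take tw.toNat).length = tw.toNat := by
        rw [List.length_take]; omega
      have hlenB : ((PySem.List.pyRange 1 tw 1).map
          (fun j => PySem.List.pyGetD pvBaseWords (PySem.Int.mod j (PySem.List.len pvBaseWords)) "")).length
          = (tw - 1).toNat := by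
        rw [List.length_map, PySem.List.length_pyRange_one]
      by_cases hidx : idx < tw.toNat - 1
      · -- both sides defined
        rw [List.getElem?_tail]
        have h1 : idx + 1 < tw.toNat := by omega
        rw [List.getElem?_take_of_lt h1, getElem?_flatten_rep k (idx + 1) (by omega)]
        have hB : ((PySem.List.pyRange 1 tw 1).map
            (fun j => PySem.List.pyGetD pvBaseWords (PySem.Int.mod j (PySem.List.len pvBaseWords)) ""))[idx]?
            = some (PySem.List.pyGetD pvBaseWords (PySem.Int.mod (1 + (idx:Int)) (PySem.List.len pvBaseWords)) "") := by
          rw [PySem.List.pyRange_one, List.map_map, List.getElem?_map,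
              List.getElem?_range (by omega : idx < (tw - 1).toNat)]
          simp [Function.comp]
        rw [hB, hm]
        have hcast : (1 + (idx:Int)) = ((1 + idx : Nat) : Int) := by push_cast; ring
        rw [hcast, (by norm_num : (42:Int) = ((42:Nat):Int)),
            PySem.Int.mod_natCast, PySem.List.pyGetD_natCast]
        have hmod : (1 + idx) % 42 < 42 := Nat.mod_lt _ (by norm_num)
        have h42 : pvBaseWords.length = 42 := by decide
        rw [List.getD_eq_getElem _ _ (by omega), List.getElem?_eq_getElem (by omega)]
        congr 2
        omega
      · -- both sides out of range
        rw [List.getElem?_eq_none (by rw [List.length_tail, hlenA]; omega),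
            List.getElem?_eq_none (by rw [hlenB]; omega)]
    rw [htail]
    -- per-text: join with replaced head = "Sample{i} " ++ joined suffix
    apply List.map_congr_left
    intro i _
    have hlenB : ((PySem.List.pyRange 1 tw 1).map
        (fun j => PySem.List.pyGetD pvBaseWords (PySem.Int.mod j (PySem.List.len pvBaseWords)) "")).length
        = (tw - 1).toNat := by
      rw [List.length_map, PySem.List.length_pyRange_one]
    match hb : (PySem.List.pyRange 1 tw 1).map
        (fun j => PySem.List.pyGetD pvBaseWords (PySem.Int.mod j (PySem.List.len pvBaseWords)) "") with
    | [] => rw [hb] at hlenB; simp at hlenB; omega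
    | b1 :: rest => exact join_cons_eq _ _ _

-- ===== VERDICT (by name: the statement is the Claim_ definition above) =====
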